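-- pv_equiv track=rewrite | github.com/evrenesat/asky | src/asky/plugins/xmpp_daemon/xmpp_formatting.py | _determine_fence_length
-- ===== SOURCE A (Python) =====
-- MAX_FENCE_LENGTH = 10
--
-- def _determine_fence_length(content: str) -> int:
--     """Find minimum fence length that doesn't appear in content."""
--     fence_length = 3
--
--     while fence_length <= MAX_FENCE_LENGTH:
--         fence = '`' * fence_length
--         if fence not in content:
--             return fence_length
--         fence_length += 1
--
--     return 3
-- ===== SOURCE B (Python) =====
-- MAX_FENCE_LENGTH = 10
--
-- def _determine_fence_length(content: str) -> int:
--     """Find minimum fence length that doesn't appear in content."""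
--     run = 0
--     max_run = 0
--     for ch in content:
--         if ch == '`':
--             run += 1
--             if run > max_run:
--                 max_run = run
--         else:
--             run = 0
--     if max_run < 3 or max_run >= MAX_FENCE_LENGTH:
--         return 3
--     return max_run + 1
-- ===== Notes on version B (the rewrite author's own statement) =====
-- stated objective: alternative
-- what changed: Replaces the loop of up to 8 substring searches with a single pass that tracks the longest backtick run and a closed-form decision (max_run<3 or >=10 gives 3, else max_run+1).
import Mathlib
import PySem

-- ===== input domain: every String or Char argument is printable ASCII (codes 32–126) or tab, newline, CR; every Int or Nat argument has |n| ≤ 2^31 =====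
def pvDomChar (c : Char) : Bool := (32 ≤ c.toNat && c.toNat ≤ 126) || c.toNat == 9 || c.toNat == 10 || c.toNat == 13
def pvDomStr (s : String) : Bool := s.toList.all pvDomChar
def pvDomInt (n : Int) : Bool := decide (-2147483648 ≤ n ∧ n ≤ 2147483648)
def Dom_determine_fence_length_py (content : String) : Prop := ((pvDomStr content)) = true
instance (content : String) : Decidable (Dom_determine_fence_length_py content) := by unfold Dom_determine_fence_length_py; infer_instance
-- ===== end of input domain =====

-- B replaces A's loop of repeated substring searches by one pass computing the longest
-- backtick run and a closed-form answer (objective: alternative - one scan, one statistic, no substring searches).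


-- ===== PORT A =====
-- while fence_length <= MAX_FENCE_LENGTH: fence = '`'*fence_length; if fence not in content: return fence_length; fence_length += 1; after the loop: return 3
def pvALoop (content : List Char) (fence_length : Nat) : Int :=
  if fence_length ≤ 10 then
    if PySem.Chars.isIn (List.replicate fence_length '`') content then
      pvALoop content (fence_length + 1)
    else (fence_length : Int)
  else 3
termination_by 11 - fence_length

def determine_fence_length_py (content : String) : Int :=
  pvALoop content.toList 3

-- ===== PORT B =====
-- one loop iteration of Source B: update (run, max_run) for the next character
def pvBStep (st : Nat × Nat) (ch : Char) : Nat × Nat :=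
  if ch = '`' then
    let run := st.1 + 1
    (run, if run > st.2 then run else st.2)
  else (0, st.2)

def determine_fence_length_py_alt (content : String) : Int :=
  let max_run := (content.toList.foldl pvBStep (0, 0)).2
  if max_run < 3 ∨ 10 ≤ max_run then 3 else (max_run : Int) + 1

-- ===== PRECONDITION & SPEC =====
def Spec_determine_fence_length_py (content : String) (out : Int) : Prop := out = determine_fence_length_py_alt content
instance (content : String) (out : Int) : Decidable (Spec_determine_fence_length_py content out) := by unfold Spec_determine_fence_length_py; infer_instance

-- ===== CLAIM (what is proved, stated in full; the proofs are below) =====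
def Claim_equal_determine_fence_length_py : Prop := ∀ (content : String), Dom_determine_fence_length_py content → Spec_determine_fence_length_py content (determine_fence_length_py content)

-- ===== LEMMAS AND PROOFS =====

-- length of the leading run of backticks
def pvLead : List Char → Nat
  | [] => 0
  | c :: t => if c = '`' then pvLead t + 1 else 0

-- longest backtick run in s, the leading run extended by r (the run already in progress)
def pvM (r : Nat) : List Char → Nat
  | [] => 0
  | c :: t => if c = '`' then max (r + 1) (pvM (r + 1) t) else pvM 0 t

lemma pvFold_snd (s : List Char) : ∀ (r m : Nat),
    (s.foldl pvBStep (r, m)).2 = max m (pvM r s) := by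
  induction s with
  | nil => intro r m; simp [pvM]
  | cons c t ih =>
    intro r m
    by_cases hc : c = '`'
    · simp [pvBStep, pvM, hc, ih]
      split_ifs <;> omega
    · simp [pvBStep, pvM, hc, ih]

lemma pvPrefix_iff (L : Nat) (s : List Char) :
    List.replicate L '`' <+: s ↔ L ≤ pvLead s := by
  induction L generalizing s with
  | zero => simp
  | succ n ih =>
    cases s with
    | nil => simp [pvLead, List.replicate_succ]
    | cons c t =>
      simp only [List.replicate_succ, List.cons_prefix_cons, pvLead]
      by_cases hc : c = '`' <;> simp [hc, eq_comm, ih]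

lemma pvM_iff (s : List Char) : ∀ (r L : Nat), 1 ≤ L →
    (L ≤ pvM r s ↔ (0 < pvLead s ∧ L ≤ r + pvLead s) ∨ List.replicate L '`' <:+: s) := by
  induction s with
  | nil =>
    intro r L hL
    simp only [pvM, pvLead]
    constructor
    · intro h; exact absurd h (by omega)
    · rintro (h | h)
      · omega
      · have := h.length_le
        simp at this; omega
  | cons c t ih =>
    intro r L hL
    by_cases hc : c = '`'
    · have e1 : pvM r (c :: t) = max (r + 1) (pvM (r + 1) t) := by simp [pvM, hc]
      have e2 : pvLead (c :: t) = pvLead t + 1 := by simp [pvLead, hc]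
      rw [e1, e2, List.infix_cons_iff, pvPrefix_iff, e2, le_max_iff, ih (r + 1) L hL]
      constructor
      · rintro (h | ⟨h1, h2⟩ | h)
        · left; omega
        · left; omega
        · right; right; exact h
      · rintro (h | h | h)
        · by_cases ha : 0 < pvLead t
          · right; left; exact ⟨ha, by omega⟩
          · left; omega
        · by_cases ha : 0 < pvLead t
          · right; left; exact ⟨ha, by omega⟩
          · left; omega
        · right; right; exact h
    · have e1 : pvM r (c :: t) = pvM 0 t := by simp [pvM, hc]
      have e2 : pvLead (c :: t) = 0 := by simp [pvLead, hc]
      rw [e1, e2, List.infix_cons_iff, pvPrefix_iff, e2, ih 0 L hL]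
      constructor
      · rintro (⟨h1, h2⟩ | h)
        · right; right
          exact ((pvPrefix_iff L t).mpr (by omega)).isInfix
        · right; right; exact h
      · rintro (h | h | h)
        · omega
        · omega
        · right; exact h

lemma pvIsIn_iff (s : List Char) (L : Nat) (hL : 1 ≤ L) :
    PySem.Chars.isIn (List.replicate L '`') s = true ↔ L ≤ pvM 0 s := by
  rw [PySem.Chars.isIn_iff_infix, pvM_iff s 0 L hL]
  constructor
  · intro h; right; exact h
  · rintro (⟨h1, h2⟩ | h)
    · exact ((pvPrefix_iff L s).mpr (by omega)).isInfix
    · exact h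

lemma pvLoop_eq (s : List Char) : ∀ (n fl : Nat), fl + n = 10 → 3 ≤ fl →
    pvALoop s fl =
      if pvM 0 s < fl then (fl : Int)
      else if pvM 0 s ≤ 9 then (pvM 0 s : Int) + 1 else 3 := by
  intro n
  induction n with
  | zero =>
    intro fl h10 h3
    have hfl : fl = 10 := by omega
    subst hfl
    rw [pvALoop]
    cases hin : PySem.Chars.isIn (List.replicate 10 '`') s with
    | true =>
      have hm := (pvIsIn_iff s 10 (by omega)).mp hin
      rw [pvALoop]
      simp only [if_pos (by omega : (10:Nat) ≤ 10)]
      norm_num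
      split_ifs <;> omega
    | false =>
      have hm : ¬ (10 ≤ pvM 0 s) := fun h => by
        rw [(pvIsIn_iff s 10 (by omega)).mpr h] at hin; cases hin
      simp only [if_pos (by omega : (10:Nat) ≤ 10), Bool.false_eq_true, if_false]
      norm_num
      split_ifs <;> omega
  | succ n ih =>
    intro fl h10 h3
    rw [pvALoop]
    cases hin : PySem.Chars.isIn (List.replicate fl '`') s with
    | true =>
      have hm := (pvIsIn_iff s fl (by omega)).mp hin
      rw [if_pos (by omega : fl ≤ 10)]
      rw [if_pos rfl, ih (fl + 1) (by omega) (by omega)]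
      split_ifs <;> omega
    | false =>
      have hm : ¬ (fl ≤ pvM 0 s) := fun h => by
        rw [(pvIsIn_iff s fl (by omega)).mpr h] at hin; cases hin
      rw [if_pos (by omega : fl ≤ 10)]
      simp only [Bool.false_eq_true, if_false]
      split_ifs <;> omega

-- ===== VERDICT (by name: the statement is the Claim_ definition above) =====
theorem determine_fence_length_py_spec : Claim_equal_determine_fence_length_py := by
  intro content _
  unfold Spec_determine_fence_length_py determine_fence_length_py determine_fence_length_py_alt
  rw [pvLoop_eq content.toList 7 3 rfl (by omega), pvFold_snd, Nat.zero_max]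
  dsimp only
  split_ifs <;> omega
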